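-- pv_equiv track=rewrite | github.com/yiminl18/provenance | qasys/langchain/baseline.py | convert_set_to_intervals
-- ===== SOURCE A (Python) =====
-- def convert_set_to_intervals(input_set):
--     if not input_set:
--         return []
--
--     sorted_list = sorted(input_set)
--     intervals = []
--     start = sorted_list[0]
--     end = sorted_list[0]
--
--     for i in range(1, len(sorted_list)):
--         if sorted_list[i] == end + 1:
--             end = sorted_list[i]
--         else:
--             intervals.append([start, end])
--             start = sorted_list[i]
--             end = sorted_list[i]
--
--     intervals.append([start, end])
--     return intervals
-- ===== SOURCE B (Python) =====
-- def convert_set_to_intervals(input_set):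
--     s = sorted(input_set)
--     starts = [v for p, v in zip([None] + s, s) if p is None or v != p + 1]
--     ends = [v for v, n in zip(s, s[1:] + [None]) if n is None or n != v + 1]
--     return [[a, b] for a, b in zip(starts, ends)]
-- ===== Notes on version B (the rewrite author's own statement) =====
-- stated objective: alternative
-- what changed: Replaced A's single stateful pass (start/end registers with an append at every break) by staged boundary detection: two independent filters over the sorted list pick out run starts (v whose predecessor position is not v-1) and run ends (v whose successor position is not v+1), which are then zipped into [start, end] pairs.
import Mathlib
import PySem

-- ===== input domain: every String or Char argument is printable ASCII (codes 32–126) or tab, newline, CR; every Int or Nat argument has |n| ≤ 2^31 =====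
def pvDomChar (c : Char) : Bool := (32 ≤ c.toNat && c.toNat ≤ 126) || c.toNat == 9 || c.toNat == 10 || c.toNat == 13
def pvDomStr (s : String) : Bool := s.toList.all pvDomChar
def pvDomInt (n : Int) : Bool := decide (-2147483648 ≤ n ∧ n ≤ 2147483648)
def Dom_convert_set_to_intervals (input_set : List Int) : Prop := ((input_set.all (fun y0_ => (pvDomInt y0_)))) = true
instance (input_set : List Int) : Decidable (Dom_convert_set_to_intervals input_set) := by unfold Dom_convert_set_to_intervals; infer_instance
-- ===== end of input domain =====

-- B replaces A's stateful run-merging loop (start/end registers, append at each break)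
-- by a staged boundary-detection algorithm: filter run starts and run ends independently
-- with local adjacency tests, then zip them into intervals (alternative; same cost).

-- ===== PORT A =====
-- loop body of A: state = (intervals, start, end), v = sorted_list[i]
def pvStepA (st : List (List Int) × Int × Int) (v : Int) : List (List Int) × Int × Int :=
  if v = st.2.2 + 1 then (st.1, st.2.1, v)
  else (st.1 ++ [[st.2.1, st.2.2]], v, v)

def convert_set_to_intervals (input_set : List Int) : List (List Int) :=
  if input_set = [] then []
  else
    let sorted_list := PySem.List.sorted input_set (fun x => x) false
    let start := PySem.List.pyGetD sorted_list 0 0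
    let r := (PySem.List.pyRange 1 (sorted_list.length : Int) 1).foldl
      (fun st i => pvStepA st (PySem.List.pyGetD sorted_list i 0)) ([], start, start)
    r.1 ++ [[r.2.1, r.2.2]]

-- ===== PORT B =====
-- Source B: starts = [v for p, v in zip([None] + s, s) if p is None or v != p + 1]
--       ends   = [v for v, n in zip(s, s[1:] + [None]) if n is None or n != v + 1]
--       [[a, b] for a, b in zip(starts, ends)]
-- (the Python slice s[1:] on a list is List.drop 1, exact here)
def convert_set_to_intervals_alt (input_set : List Int) : List (List Int) :=
  let s := PySem.List.sorted input_set (fun x => x) false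
  let starts := ((List.zip ((none : Option Int) :: s.map some) s).filter
      (fun pv => match pv.1 with | none => true | some p => pv.2 != p + 1)).map (fun pv => pv.2)
  let ends := ((List.zip s ((s.drop 1).map some ++ [(none : Option Int)])).filter
      (fun vn => match vn.2 with | none => true | some n => n != vn.1 + 1)).map (fun vn => vn.1)
  List.zipWith (fun a b => [a, b]) starts ends

-- ===== PRECONDITION & SPEC =====
def Spec_convert_set_to_intervals (input_set : List Int) (out : List (List Int)) : Prop := out = convert_set_to_intervals_alt input_set
instance (input_set : List Int) (out : List (List Int)) : Decidable (Spec_convert_set_to_intervals input_set out) := by unfold Spec_convert_set_to_intervals; infer_instance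

-- ===== CLAIM (what is proved, stated in full; the proofs are below) =====
def Claim_equal_convert_set_to_intervals : Prop := ∀ (input_set : List Int), Dom_convert_set_to_intervals input_set → Spec_convert_set_to_intervals input_set (convert_set_to_intervals input_set)

-- ===== LEMMAS AND PROOFS =====

-- canonical recursive description of the run decomposition of `st :: en-tail`
def pvRuns : Int → Int → List Int → List (List Int)
  | st, en, [] => [[st, en]]
  | st, en, v :: t => if v = en + 1 then pvRuns st v t else [st, en] :: pvRuns v v t

-- run starts strictly after a predecessor p
def pvStartsF : Int → List Int → List Int
  | _, [] => []
  | p, v :: t => (if v = p + 1 then [] else [v]) ++ pvStartsF v t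

-- run ends of `v :: t`
def pvEndsF : Int → List Int → List Int
  | v, [] => [v]
  | v, n :: t => (if n = v + 1 then [] else [v]) ++ pvEndsF n t

lemma pvStarts_eq (t : List Int) (p : Int) :
    ((List.zip (some p :: t.map some) t).filter
      (fun pv => match pv.1 with | none => true | some q => pv.2 != q + 1)).map (fun pv => pv.2)
      = pvStartsF p t := by
  induction t generalizing p with
  | nil => simp [pvStartsF]
  | cons v t ih =>
      simp only [List.map_cons, List.zip_cons_cons, List.filter_cons]
      by_cases h : v = p + 1
      · simp [h, pvStartsF, ih]
      · simp [h, pvStartsF, ih]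

lemma pvEnds_eq (t : List Int) (v : Int) :
    ((List.zip (v :: t) (t.map some ++ [(none : Option Int)])).filter
      (fun vn => match vn.2 with | none => true | some n => n != vn.1 + 1)).map (fun vn => vn.1)
      = pvEndsF v t := by
  induction t generalizing v with
  | nil => simp [pvEndsF]
  | cons n t ih =>
      simp only [List.map_cons, List.cons_append, List.zip_cons_cons, List.filter_cons]
      by_cases h : n = v + 1
      · simp [h, pvEndsF, ih]
      · simp [h, pvEndsF, ih]

lemma pvZip_runs (t : List Int) (st en : Int) :
    List.zipWith (fun a b => [a, b]) (st :: pvStartsF en t) (pvEndsF en t) = pvRuns st en t := by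
  induction t generalizing st en with
  | nil => simp [pvStartsF, pvEndsF, pvRuns]
  | cons v t ih =>
      by_cases h : v = en + 1
      · simp [pvStartsF, pvEndsF, pvRuns, h, ih]
      · simp [pvStartsF, pvEndsF, pvRuns, h, ih]

lemma pvFoldA_runs (t : List Int) (acc : List (List Int)) (st en : Int) :
    (let r := t.foldl pvStepA (acc, st, en); r.1 ++ [[r.2.1, r.2.2]]) = acc ++ pvRuns st en t := by
  induction t generalizing acc st en with
  | nil => simp [pvRuns]
  | cons v t ih =>
      by_cases h : v = en + 1
      · have : pvStepA (acc, st, en) v = (acc, st, v) := by simp [pvStepA, h]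
        simp only [List.foldl_cons, this, ih, pvRuns, if_pos h]
      · have : pvStepA (acc, st, en) v = (acc ++ [[st, en]], v, v) := by simp [pvStepA, h]
        simp only [List.foldl_cons, this, ih, pvRuns, if_neg h]
        simp

-- ===== VERDICT (by name: the statement is the Claim_ definition above) =====
theorem convert_set_to_intervals_spec : Claim_equal_convert_set_to_intervals := by
  intro input_set _
  unfold Spec_convert_set_to_intervals convert_set_to_intervals convert_set_to_intervals_alt
  by_cases h : input_set = []
  · simp [h, PySem.List.sorted]
  · rw [if_neg h]
    have hs : PySem.List.sorted input_set (fun x => x) false ≠ [] := by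
      intro hnil
      have := PySem.List.sorted_perm input_set (fun x => x) false
      rw [hnil] at this
      exact h (List.Perm.nil_eq this).symm
    obtain ⟨a, t, hat⟩ := List.exists_cons_of_ne_nil hs
    simp only [hat]
    have h0 : PySem.List.pyGetD (a :: t) 0 0 = a := by
      simp [PySem.List.pyGetD, PySem.List.pyGet?, PySem.List.pyIdx?]
    rw [h0]
    have hfold := PySem.List.foldl_pyRange_pyGetD' (a :: t) (0 : Int) pvStepA
        (([], a, a) : List (List Int) × Int × Int) (a := 1) (by norm_num)
    simp only [hfold]
    have hdrop : List.drop (1 : Int).toNat (a :: t) = t := by simp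
    rw [hdrop]
    have hA := pvFoldA_runs t [] a a
    simp only [List.nil_append] at hA
    rw [hA]
    -- B side
    simp only [List.map_cons, List.zip_cons_cons, List.filter_cons, List.drop_succ_cons,
      List.drop_zero, if_true, List.map_cons]
    rw [pvStarts_eq t a, pvEnds_eq t a]
    exact (pvZip_runs t a a).symm
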